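-- pv_equiv track=rewrite | github.com/aronnebrivio/homeassistant-config | custom_components/waste_collection_schedule/waste_collection_schedule/source/hornsby_nsw_gov_au.py | _select_weekly_waste_calendar_pdf_href
-- ===== SOURCE A (Python) =====
-- def _select_weekly_waste_calendar_pdf_href(hrefs: list[str]) -> str | None:
--     """Select the weekly waste calendar PDF URL from the list of hrefs."""
--     pdfs = [h for h in hrefs if h.lower().endswith(".pdf")]
--     if not pdfs:
--         return None
--
--     # Weekly waste calendar under 'suds-waste-and-recycling' or 'muds-'
--     for pattern in ("suds-waste-and-recycling", "muds-green-waste"):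
--         cand = [h for h in pdfs if "collection-calendars" in h and pattern in h]
--         if cand:
--             return cand[0]
--
--     # Fallback: any collection-calendars PDF that doesn't look like bulky-waste
--     cand = [h for h in pdfs if "collection-calendars" in h and "bulky" not in h.lower()]
--     if cand:
--         return cand[0]
--
--     return pdfs[0]
-- ===== SOURCE B (Python) =====
-- def _select_weekly_waste_calendar_pdf_href(hrefs: list[str]) -> str | None:
--     """Select the weekly waste calendar PDF URL from the list of hrefs."""
--     pdfs = [h for h in hrefs if h.lower().endswith(".pdf")]
--     if not pdfs:
--         return None
--
--     def rank(h: str) -> int: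
--         if "collection-calendars" in h:
--             if "suds-waste-and-recycling" in h:
--                 return 0
--             if "muds-green-waste" in h:
--                 return 1
--             if "bulky" not in h.lower():
--                 return 2
--         return 3
--
--     best = pdfs[0]
--     best_rank = rank(best)
--     for h in pdfs[1:]:
--         r = rank(h)
--         if r < best_rank:
--             best, best_rank = h, r
--     return best
-- ===== Notes on version B (the rewrite author's own statement) =====
-- stated objective: alternative
-- what changed: Replaces A's three separate filter-then-take-first passes over the pdfs list with a single pass that assigns each pdf a priority rank (0-3) and keeps the minimum-rank, earliest pdf.
import Mathlib
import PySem

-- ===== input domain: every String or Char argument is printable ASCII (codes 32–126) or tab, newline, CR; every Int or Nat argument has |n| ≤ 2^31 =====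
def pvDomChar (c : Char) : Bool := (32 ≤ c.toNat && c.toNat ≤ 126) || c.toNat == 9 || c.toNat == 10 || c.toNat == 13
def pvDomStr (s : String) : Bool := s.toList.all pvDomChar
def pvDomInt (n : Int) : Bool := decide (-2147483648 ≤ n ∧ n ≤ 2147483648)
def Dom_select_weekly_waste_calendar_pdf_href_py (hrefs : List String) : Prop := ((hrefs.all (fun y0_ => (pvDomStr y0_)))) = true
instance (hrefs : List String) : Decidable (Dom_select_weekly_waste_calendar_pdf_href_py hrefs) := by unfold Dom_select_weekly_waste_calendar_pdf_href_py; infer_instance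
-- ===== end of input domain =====

-- B replaces A's three filter-then-first passes by a single min-rank pass (same result, same cost class).


-- shared atomic tests ("…" in h, "bulky" in h.lower(), h.lower().endswith(".pdf"))
def pvCC (h : String) : Bool := PySem.Str.isIn "collection-calendars" h
def pvBulky (h : String) : Bool := PySem.Str.isIn "bulky" (PySem.Str.lower h)
def pvIsPdf (h : String) : Bool := PySem.Str.endswith (PySem.Str.lower h) ".pdf"

-- ===== PORT A =====
-- the for-loop over the two patterns: first nonempty [h for h in pdfs if cc in h and pattern in h] wins
def pvLoopA (pdfs : List String) : List String → Option String
  | [] => none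
  | pat :: rest =>
    match pdfs.filter (fun h => pvCC h && PySem.Str.isIn pat h) with
    | [] => pvLoopA pdfs rest
    | c :: _ => some c

def pvCascadeA (pdfs : List String) : Option String :=
  match pvLoopA pdfs ["suds-waste-and-recycling", "muds-green-waste"] with
  | some r => some r
  | none =>
    match pdfs.filter (fun h => pvCC h && !pvBulky h) with
    | c :: _ => some c
    | [] => pdfs.head?        -- pdfs[0]; pdfs is nonempty here

def select_weekly_waste_calendar_pdf_href_py (hrefs : List String) : Option String :=
  let pdfs := hrefs.filter pvIsPdf
  if pdfs.isEmpty then none else pvCascadeA pdfs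

-- ===== PORT B =====
def pvRank (h : String) : Nat :=
  if pvCC h then
    if PySem.Str.isIn "suds-waste-and-recycling" h then 0
    else if PySem.Str.isIn "muds-green-waste" h then 1
    else if !pvBulky h then 2
    else 3
  else 3

-- the single pass: keep the earliest pdf of minimal rank
def pvPick : List String → String → Nat → String
  | [], best, _ => best
  | h :: t, best, br => if pvRank h < br then pvPick t h (pvRank h) else pvPick t best br

def select_weekly_waste_calendar_pdf_href_py_alt (hrefs : List String) : Option String :=
  let pdfs := hrefs.filter pvIsPdf
  match pdfs with
  | [] => none
  | p0 :: rest => some (pvPick rest p0 (pvRank p0))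

-- ===== PRECONDITION & SPEC =====
def Spec_select_weekly_waste_calendar_pdf_href_py (hrefs : List String) (out : Option String) : Prop := out = select_weekly_waste_calendar_pdf_href_py_alt hrefs
instance (hrefs : List String) (out : Option String) : Decidable (Spec_select_weekly_waste_calendar_pdf_href_py hrefs out) := by unfold Spec_select_weekly_waste_calendar_pdf_href_py; infer_instance

-- ===== CLAIM (what is proved, stated in full; the proofs are below) =====
def Claim_equal_select_weekly_waste_calendar_pdf_href_py : Prop := ∀ (hrefs : List String), Dom_select_weekly_waste_calendar_pdf_href_py hrefs → Spec_select_weekly_waste_calendar_pdf_href_py hrefs (select_weekly_waste_calendar_pdf_href_py hrefs)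

-- ===== LEMMAS AND PROOFS =====

-- minimal rank of a list (4 = above every real rank)
def pvMin (l : List String) : Nat := l.foldr (fun x m => min (pvRank x) m) 4

lemma pvMin_cons (a : String) (t : List String) : pvMin (a :: t) = min (pvRank a) (pvMin t) := rfl

lemma pvRank_le (h : String) : pvRank h ≤ 3 := by
  unfold pvRank; split_ifs <;> omega

lemma pvMin_le {l : List String} {x : String} (hx : x ∈ l) : pvMin l ≤ pvRank x := by
  induction l with
  | nil => cases hx
  | cons a t ih =>
    rcases List.mem_cons.mp hx with rfl | hx
    · rw [pvMin_cons]; omega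
    · have := ih hx; rw [pvMin_cons]; omega

lemma le_pvMin {l : List String} {v : Nat} (hv : v ≤ 4) (h : ∀ x ∈ l, v ≤ pvRank x) : v ≤ pvMin l := by
  induction l with
  | nil => simpa [pvMin]
  | cons a t ih =>
    have ha := h a (by simp)
    have ht := ih (fun x hx => h x (by simp [hx]))
    rw [pvMin_cons]; omega

lemma pvMin_eq {l : List String} {x : String} {v : Nat} (hx : x ∈ l) (hr : pvRank x = v)
    (h : ∀ y ∈ l, v ≤ pvRank y) : pvMin l = v := by
  have hv3 : v ≤ 3 := hr ▸ pvRank_le x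
  have h1 := pvMin_le hx
  have h2 := le_pvMin (by omega) h
  omega

lemma find?_congr_mem {l : List String} {p q : String → Bool} (h : ∀ x ∈ l, p x = q x) :
    l.find? p = l.find? q := by
  induction l with
  | nil => rfl
  | cons a t ih =>
    have ha := h a (by simp)
    by_cases hp : p a = true
    · rw [List.find?_cons_of_pos hp, List.find?_cons_of_pos (ha ▸ hp)]
    · have hp' : p a = false := by simpa using hp
      rw [List.find?_cons_of_neg (by simp [hp']), List.find?_cons_of_neg (by simp [← ha, hp'])]
      exact ih (fun x hx => h x (by simp [hx]))

-- rank ↔ tier predicates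
lemma rank0_iff (x : String) :
    (pvRank x == 0) = (pvCC x && PySem.Str.isIn "suds-waste-and-recycling" x) := by
  unfold pvRank; split_ifs <;> simp_all

lemma rank1_iff (x : String)
    (h0 : (pvCC x && PySem.Str.isIn "suds-waste-and-recycling" x) = false) :
    (pvRank x == 1) = (pvCC x && PySem.Str.isIn "muds-green-waste" x) := by
  unfold pvRank; split_ifs <;> simp_all

lemma rank2_iff (x : String)
    (h0 : (pvCC x && PySem.Str.isIn "suds-waste-and-recycling" x) = false)
    (h1 : (pvCC x && PySem.Str.isIn "muds-green-waste" x) = false) :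
    (pvRank x == 2) = (pvCC x && !pvBulky x) := by
  unfold pvRank; split_ifs <;> simp_all

lemma rank3_of (x : String)
    (h0 : (pvCC x && PySem.Str.isIn "suds-waste-and-recycling" x) = false)
    (h1 : (pvCC x && PySem.Str.isIn "muds-green-waste" x) = false)
    (h2 : (pvCC x && !pvBulky x) = false) : pvRank x = 3 := by
  unfold pvRank; split_ifs <;> simp_all

lemma rank0_of {x : String}
    (h : (pvCC x && PySem.Str.isIn "suds-waste-and-recycling" x) = true) : pvRank x = 0 := by
  have := rank0_iff x; rw [h] at this; simpa using this

lemma rank1_of {x : String}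
    (h0 : (pvCC x && PySem.Str.isIn "suds-waste-and-recycling" x) = false)
    (h : (pvCC x && PySem.Str.isIn "muds-green-waste" x) = true) : pvRank x = 1 := by
  have := rank1_iff x h0; rw [h] at this; simpa using this

lemma rank2_of {x : String}
    (h0 : (pvCC x && PySem.Str.isIn "suds-waste-and-recycling" x) = false)
    (h1 : (pvCC x && PySem.Str.isIn "muds-green-waste" x) = false)
    (h : (pvCC x && !pvBulky x) = true) : pvRank x = 2 := by
  have := rank2_iff x h0 h1; rw [h] at this; simpa using this

-- B's single pass picks the earliest element of minimal rank
lemma pick_eq_firstMin : ∀ (t : List String) (best : String),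
    some (pvPick t best (pvRank best)) =
      (best :: t).find? (fun x => pvRank x == pvMin (best :: t)) := by
  intro t
  induction t with
  | nil =>
    intro best
    have hb := pvRank_le best
    have hm : pvMin [best] = pvRank best := by rw [pvMin_cons]; simp [pvMin]; omega
    rw [hm, List.find?_cons_of_pos (by simp)]
    rfl
  | cons h t' ih =>
    intro best
    by_cases hlt : pvRank h < pvRank best
    · rw [show pvPick (h :: t') best (pvRank best) = pvPick t' h (pvRank h) by
        simp [pvPick, hlt]]
      rw [ih h]
      have h1 : pvMin (h :: t') ≤ pvRank h := pvMin_le (by simp)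
      have hm : pvMin (best :: h :: t') = pvMin (h :: t') := by
        rw [pvMin_cons best]; omega
      have hb : ¬ (fun x => pvRank x == pvMin (h :: t')) best = true := by
        show ¬ (pvRank best == pvMin (h :: t')) = true
        simp only [beq_iff_eq]; omega
      rw [hm, List.find?_cons_of_neg (p := fun x => pvRank x == pvMin (h :: t')) (a := best) hb]
    · rw [show pvPick (h :: t') best (pvRank best) = pvPick t' best (pvRank best) by
        simp [pvPick, hlt]]
      rw [ih best]
      have hm : pvMin (best :: h :: t') = pvMin (best :: t') := by
        simp only [pvMin_cons]; omega
      rw [hm]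
      by_cases hb : pvRank best = pvMin (best :: t')
      · rw [List.find?_cons_of_pos (by simpa using hb),
            List.find?_cons_of_pos (by simpa using hb)]
      · have hmlt : pvMin (best :: t') < pvRank best := by
          have := pvMin_le (l := best :: t') (x := best) (by simp); omega
        have hbf : ¬ (fun x => pvRank x == pvMin (best :: t')) best = true := by
          show ¬ (pvRank best == pvMin (best :: t')) = true
          simp only [beq_iff_eq]; exact hb
        have hhf : ¬ (fun x => pvRank x == pvMin (best :: t')) h = true := by
          show ¬ (pvRank h == pvMin (best :: t')) = true
          simp only [beq_iff_eq]; omega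
        rw [List.find?_cons_of_neg (p := fun x => pvRank x == pvMin (best :: t')) (a := best) hbf,
            List.find?_cons_of_neg (p := fun x => pvRank x == pvMin (best :: t')) (a := best) hbf,
            List.find?_cons_of_neg (p := fun x => pvRank x == pvMin (best :: t')) (a := h) hhf]

-- A's cascade also picks the earliest element of minimal rank
lemma cascade_eq_firstMin (p0 : String) (rest : List String) :
    pvCascadeA (p0 :: rest) =
      (p0 :: rest).find? (fun x => pvRank x == pvMin (p0 :: rest)) := by
  set l := p0 :: rest with hl
  cases hf0 : l.filter (fun h => pvCC h && PySem.Str.isIn "suds-waste-and-recycling" h) with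
  | cons a t0 =>
    have ha : a ∈ l ∧ (pvCC a && PySem.Str.isIn "suds-waste-and-recycling" a) = true := by
      have : a ∈ l.filter (fun h => pvCC h && PySem.Str.isIn "suds-waste-and-recycling" h) := by
        rw [hf0]; simp
      simpa [List.mem_filter] using this
    have hmin : pvMin l = 0 := pvMin_eq ha.1 (rank0_of ha.2) (fun y _ => Nat.zero_le _)
    rw [hmin, find?_congr_mem (fun x _ => rank0_iff x), ← List.head?_filter, hf0]
    simp only [pvCascadeA, pvLoopA, hf0]
    rfl
  | nil =>
    have h0 : ∀ x ∈ l, (pvCC x && PySem.Str.isIn "suds-waste-and-recycling" x) = false := by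
      intro x hx
      simpa using (List.filter_eq_nil_iff.mp hf0) x hx
    cases hf1 : l.filter (fun h => pvCC h && PySem.Str.isIn "muds-green-waste" h) with
    | cons a t1 =>
      have ha : a ∈ l ∧ (pvCC a && PySem.Str.isIn "muds-green-waste" a) = true := by
        have : a ∈ l.filter (fun h => pvCC h && PySem.Str.isIn "muds-green-waste" h) := by
          rw [hf1]; simp
        simpa [List.mem_filter] using this
      have hmin : pvMin l = 1 := by
        refine pvMin_eq ha.1 (rank1_of (h0 a ha.1) ha.2) ?_
        intro y hy
        have := rank0_iff y
        rw [h0 y hy] at this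
        simp at this
        omega
      rw [hmin, find?_congr_mem (fun x hx => rank1_iff x (h0 x hx)), ← List.head?_filter, hf1]
      simp only [pvCascadeA, pvLoopA, hf0, hf1]
      rfl
    | nil =>
      have h1 : ∀ x ∈ l, (pvCC x && PySem.Str.isIn "muds-green-waste" x) = false := by
        intro x hx
        simpa using (List.filter_eq_nil_iff.mp hf1) x hx
      cases hff : l.filter (fun h => pvCC h && !pvBulky h) with
      | cons a tf =>
        have ha : a ∈ l ∧ (pvCC a && !pvBulky a) = true := by
          have : a ∈ l.filter (fun h => pvCC h && !pvBulky h) := by rw [hff]; simp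
          simpa [List.mem_filter] using this
        have hmin : pvMin l = 2 := by
          refine pvMin_eq ha.1 (rank2_of (h0 a ha.1) (h1 a ha.1) ha.2) ?_
          intro y hy
          have e0 := rank0_iff y; rw [h0 y hy] at e0
          have e1 := rank1_iff y (h0 y hy); rw [h1 y hy] at e1
          simp at e0 e1
          omega
        rw [hmin, find?_congr_mem (fun x hx => rank2_iff x (h0 x hx) (h1 x hx)),
            ← List.head?_filter, hff]
        simp only [pvCascadeA, pvLoopA, hf0, hf1, hff]
        rfl
      | nil =>
        have hfall : ∀ x ∈ l, (pvCC x && !pvBulky x) = false := by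
          intro x hx
          simpa using (List.filter_eq_nil_iff.mp hff) x hx
        have hall3 : ∀ x ∈ l, pvRank x = 3 := fun x hx =>
          rank3_of x (h0 x hx) (h1 x hx) (hfall x hx)
        have hp0 : p0 ∈ l := by rw [hl]; simp
        have hmin : pvMin l = 3 :=
          pvMin_eq hp0 (hall3 p0 hp0) (fun y hy => by rw [hall3 y hy])
        rw [hmin]
        rw [show l.find? (fun x => pvRank x == 3) = some p0 by
          rw [hl, List.find?_cons_of_pos (by simpa using hall3 p0 hp0)]]
        simp only [pvCascadeA, pvLoopA, hf0, hf1, hff]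
        rfl

-- ===== VERDICT (by name: the statement is the Claim_ definition above) =====
theorem select_weekly_waste_calendar_pdf_href_py_spec : Claim_equal_select_weekly_waste_calendar_pdf_href_py := by
  intro hrefs _
  unfold Spec_select_weekly_waste_calendar_pdf_href_py
  unfold select_weekly_waste_calendar_pdf_href_py select_weekly_waste_calendar_pdf_href_py_alt
  cases hp : hrefs.filter pvIsPdf with
  | nil => simp
  | cons p0 rest =>
    simp only [List.isEmpty_cons, if_neg Bool.false_ne_true]
    rw [cascade_eq_firstMin, ← pick_eq_firstMin]
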